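-- pv_equiv track=rewrite | github.com/uDALES/u-dales | pre/predales/predales/tools.py | blockshift
-- ===== SOURCE A (Python) =====
-- def blockshift(blocks, limits, xshift, yshift):
--     # shift final block layout for periodic boundaries:
--     # shift all block elements by intersection (xshift, yshift)
--
--     xmin = limits[0]
--     xmax = limits[1]
--     ymin = limits[2]
--     ymax = limits[3]
--
--     shiftblocks = []
--     for block in blocks:
--         newx = [(b - xshift) % xmax for b in block[0:2]]
--         newy = [(a - yshift) % ymax for a in block[2:4]]
--         z = block[4:6]
--         shiftblocks.append(newx + newy + z)
--
--     # split up blocks that go over boundaries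
--     tmpblocks = []
--     for block in shiftblocks:
--         # if imax < imin
--         if block[1] <= block[0]:
--             # create new block coordinates
--             x1 = [block[0], xmax]
--             x2 = [xmin, block[1]]
--             y = block[2:4]
--             z = block[4:6]
--             newblock1 = x1 + y + z
--             newblock2 = x2 + y + z
--             tmpblocks.extend([newblock1, newblock2])
--         else:
--             tmpblocks.extend([block])
--
--     newblocks = []
--     for block in tmpblocks:
--         # if jmax < jmin
--         if block[3] <= block[2]:
--             # create new block coordinates
--             x = block[0:2]
--             y1 = [block[2], ymax]
--             y2 = [ymin, block[3]]
--             z = block[4:6]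
--             newblock3 = x + y1 + z
--             newblock4 = x + y2 + z
--             newblocks.extend([newblock3, newblock4])
--         else:
--             newblocks.extend([block])
--
--     return newblocks
-- ===== SOURCE B (Python) =====
-- def blockshift(blocks, limits, xshift, yshift):
--     # one fused pass: shift, x-split and y-split per block, nested in A's order
--     xmin, xmax, ymin, ymax = limits[0], limits[1], limits[2], limits[3]
--     out = []
--     for block in blocks:
--         x0, x1 = [(b - xshift) % xmax for b in block[0:2]]
--         y0, y1 = [(a - yshift) % ymax for a in block[2:4]]
--         z = block[4:6]
--         xpieces = [[x0, xmax], [xmin, x1]] if x1 <= x0 else [[x0, x1]]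
--         ypieces = [[y0, ymax], [ymin, y1]] if y1 <= y0 else [[y0, y1]]
--         for xp in xpieces:
--             for yp in ypieces:
--                 out.append(xp + yp + z)
--     return out
-- ===== Notes on version B (the rewrite author's own statement) =====
-- stated objective: alternative
-- what changed: Replaces A's three sequential passes (shift all blocks, then x-split scan, then y-split scan over intermediate lists) with one fused loop that shifts a block and emits its x-pieces and nested y-pieces immediately, never re-reading coordinates out of intermediate concatenated lists.
import Mathlib
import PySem

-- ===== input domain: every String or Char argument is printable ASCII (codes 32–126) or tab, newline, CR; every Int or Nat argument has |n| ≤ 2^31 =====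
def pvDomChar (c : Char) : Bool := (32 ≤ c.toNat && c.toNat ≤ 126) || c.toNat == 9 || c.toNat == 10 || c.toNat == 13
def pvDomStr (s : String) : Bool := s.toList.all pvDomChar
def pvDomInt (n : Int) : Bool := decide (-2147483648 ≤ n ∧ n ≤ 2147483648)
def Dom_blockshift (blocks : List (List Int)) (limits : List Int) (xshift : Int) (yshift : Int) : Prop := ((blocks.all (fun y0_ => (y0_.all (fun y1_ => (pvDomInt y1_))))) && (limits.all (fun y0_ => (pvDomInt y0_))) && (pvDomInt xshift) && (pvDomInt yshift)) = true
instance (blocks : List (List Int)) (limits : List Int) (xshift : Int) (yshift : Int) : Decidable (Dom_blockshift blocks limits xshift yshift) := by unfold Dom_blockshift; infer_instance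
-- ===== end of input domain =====

-- B fuses A's three passes (shift, x-split, y-split) into one loop per block with nested branching; same values in the same order.


-- ===== PORT A =====
def blockshift (blocks : List (List Int)) (limits : List Int) (xshift : Int) (yshift : Int) : List (List Int) :=
  let xmin := PySem.List.pyGetD limits 0 0
  let xmax := PySem.List.pyGetD limits 1 0
  let ymin := PySem.List.pyGetD limits 2 0
  let ymax := PySem.List.pyGetD limits 3 0
  let shiftblocks := blocks.foldl (fun acc block =>
    acc ++ [((PySem.List.slice block (some 0) (some 2)).map (fun b => PySem.Int.mod (b - xshift) xmax)) ++
            ((PySem.List.slice block (some 2) (some 4)).map (fun a => PySem.Int.mod (a - yshift) ymax)) ++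
            PySem.List.slice block (some 4) (some 6)]) []
  let tmpblocks := shiftblocks.foldl (fun acc block =>
    if PySem.List.pyGetD block 1 0 ≤ PySem.List.pyGetD block 0 0 then
      acc ++ [[PySem.List.pyGetD block 0 0, xmax] ++ PySem.List.slice block (some 2) (some 4) ++ PySem.List.slice block (some 4) (some 6),
              [xmin, PySem.List.pyGetD block 1 0] ++ PySem.List.slice block (some 2) (some 4) ++ PySem.List.slice block (some 4) (some 6)]
    else acc ++ [block]) []
  let newblocks := tmpblocks.foldl (fun acc block =>
    if PySem.List.pyGetD block 3 0 ≤ PySem.List.pyGetD block 2 0 then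
      acc ++ [PySem.List.slice block (some 0) (some 2) ++ [PySem.List.pyGetD block 2 0, ymax] ++ PySem.List.slice block (some 4) (some 6),
              PySem.List.slice block (some 0) (some 2) ++ [ymin, PySem.List.pyGetD block 3 0] ++ PySem.List.slice block (some 4) (some 6)]
    else acc ++ [block]) []
  newblocks

-- ===== PORT B =====
def blockshift_alt (blocks : List (List Int)) (limits : List Int) (xshift : Int) (yshift : Int) : List (List Int) :=
  let xmin := PySem.List.pyGetD limits 0 0
  let xmax := PySem.List.pyGetD limits 1 0
  let ymin := PySem.List.pyGetD limits 2 0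
  let ymax := PySem.List.pyGetD limits 3 0
  blocks.foldl (fun out block =>
    let nx := (PySem.List.slice block (some 0) (some 2)).map (fun b => PySem.Int.mod (b - xshift) xmax)
    let ny := (PySem.List.slice block (some 2) (some 4)).map (fun a => PySem.Int.mod (a - yshift) ymax)
    let z := PySem.List.slice block (some 4) (some 6)
    let x0 := PySem.List.pyGetD nx 0 0
    let x1 := PySem.List.pyGetD nx 1 0
    let y0 := PySem.List.pyGetD ny 0 0
    let y1 := PySem.List.pyGetD ny 1 0
    let xpieces := if x1 ≤ x0 then [[x0, xmax], [xmin, x1]] else [[x0, x1]]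
    let ypieces := if y1 ≤ y0 then [[y0, ymax], [ymin, y1]] else [[y0, y1]]
    out ++ xpieces.flatMap (fun xp => ypieces.map (fun yp => xp ++ yp ++ z))) []

-- ===== PRECONDITION & SPEC =====
-- Pre_ is exactly where the Python A returns: limits has 4 entries, every block has the 4 coordinates
-- (else IndexError), and when any block exists the moduli xmax, ymax are nonzero (else ZeroDivisionError).
def Pre_blockshift (blocks : List (List Int)) (limits : List Int) (xshift : Int) (yshift : Int) : Prop :=
  4 ≤ limits.length ∧ (∀ b ∈ blocks, 4 ≤ b.length) ∧
  (blocks = [] ∨ (PySem.List.pyGetD limits 1 0 ≠ 0 ∧ PySem.List.pyGetD limits 3 0 ≠ 0))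
instance (blocks : List (List Int)) (limits : List Int) (xshift : Int) (yshift : Int) : Decidable (Pre_blockshift blocks limits xshift yshift) := by unfold Pre_blockshift; infer_instance
def pvWitness_blockshift : List (List Int) × List Int × Int × Int := ([[0, 2, 0, 2, 0, 1]], [0, 4, 0, 4], 1, 1)

def Spec_blockshift (blocks : List (List Int)) (limits : List Int) (xshift : Int) (yshift : Int) (out : List (List Int)) : Prop := out = blockshift_alt blocks limits xshift yshift
instance (blocks : List (List Int)) (limits : List Int) (xshift : Int) (yshift : Int) (out : List (List Int)) : Decidable (Spec_blockshift blocks limits xshift yshift out) := by unfold Spec_blockshift; infer_instance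

-- ===== CLAIM (what is proved, stated in full; the proofs are below) =====
def Claim_equal_blockshift : Prop := ∀ (blocks : List (List Int)) (limits : List Int) (xshift : Int) (yshift : Int), Dom_blockshift blocks limits xshift yshift → Pre_blockshift blocks limits xshift yshift → Spec_blockshift blocks limits xshift yshift (blockshift blocks limits xshift yshift)

-- ===== LEMMAS AND PROOFS =====

-- per-block pieces of A's three passes (proof-only helpers)
def pvSh (xshift yshift xmax ymax : Int) (block : List Int) : List Int :=
  ((PySem.List.slice block (some 0) (some 2)).map (fun b => PySem.Int.mod (b - xshift) xmax)) ++
  ((PySem.List.slice block (some 2) (some 4)).map (fun a => PySem.Int.mod (a - yshift) ymax)) ++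
  PySem.List.slice block (some 4) (some 6)

def pvXsp (xmin xmax : Int) (block : List Int) : List (List Int) :=
  if PySem.List.pyGetD block 1 0 ≤ PySem.List.pyGetD block 0 0 then
    [[PySem.List.pyGetD block 0 0, xmax] ++ PySem.List.slice block (some 2) (some 4) ++ PySem.List.slice block (some 4) (some 6),
     [xmin, PySem.List.pyGetD block 1 0] ++ PySem.List.slice block (some 2) (some 4) ++ PySem.List.slice block (some 4) (some 6)]
  else [block]

def pvYsp (ymin ymax : Int) (block : List Int) : List (List Int) :=
  if PySem.List.pyGetD block 3 0 ≤ PySem.List.pyGetD block 2 0 then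
    [PySem.List.slice block (some 0) (some 2) ++ [PySem.List.pyGetD block 2 0, ymax] ++ PySem.List.slice block (some 4) (some 6),
     PySem.List.slice block (some 0) (some 2) ++ [ymin, PySem.List.pyGetD block 3 0] ++ PySem.List.slice block (some 4) (some 6)]
  else [block]

-- B's per-block function
def pvG (xmin xmax ymin ymax xshift yshift : Int) (block : List Int) : List (List Int) :=
  let nx := (PySem.List.slice block (some 0) (some 2)).map (fun b => PySem.Int.mod (b - xshift) xmax)
  let ny := (PySem.List.slice block (some 2) (some 4)).map (fun a => PySem.Int.mod (a - yshift) ymax)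
  let z := PySem.List.slice block (some 4) (some 6)
  let x0 := PySem.List.pyGetD nx 0 0
  let x1 := PySem.List.pyGetD nx 1 0
  let y0 := PySem.List.pyGetD ny 0 0
  let y1 := PySem.List.pyGetD ny 1 0
  let xpieces := if x1 ≤ x0 then [[x0, xmax], [xmin, x1]] else [[x0, x1]]
  let ypieces := if y1 ≤ y0 then [[y0, ymax], [ymin, y1]] else [[y0, y1]]
  xpieces.flatMap (fun xp => ypieces.map (fun yp => xp ++ yp ++ z))

lemma pass2_eq (xmin xmax : Int) (l : List (List Int)) :
    l.foldl (fun acc block =>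
      if PySem.List.pyGetD block 1 0 ≤ PySem.List.pyGetD block 0 0 then
        acc ++ [[PySem.List.pyGetD block 0 0, xmax] ++ PySem.List.slice block (some 2) (some 4) ++ PySem.List.slice block (some 4) (some 6),
                [xmin, PySem.List.pyGetD block 1 0] ++ PySem.List.slice block (some 2) (some 4) ++ PySem.List.slice block (some 4) (some 6)]
      else acc ++ [block]) [] = l.flatMap (pvXsp xmin xmax) := by
  rw [PySem.List.foldl_congr_mem l _ (fun acc blk => acc ++ pvXsp xmin xmax blk) []
        (by intro acc blk _; unfold pvXsp; split <;> rename_i h <;> simp [h])]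
  rw [PySem.List.foldl_append_eq_flatMap]
  rfl

lemma pass3_eq (ymin ymax : Int) (l : List (List Int)) :
    l.foldl (fun acc block =>
      if PySem.List.pyGetD block 3 0 ≤ PySem.List.pyGetD block 2 0 then
        acc ++ [PySem.List.slice block (some 0) (some 2) ++ [PySem.List.pyGetD block 2 0, ymax] ++ PySem.List.slice block (some 4) (some 6),
                PySem.List.slice block (some 0) (some 2) ++ [ymin, PySem.List.pyGetD block 3 0] ++ PySem.List.slice block (some 4) (some 6)]
      else acc ++ [block]) [] = l.flatMap (pvYsp ymin ymax) := by
  rw [PySem.List.foldl_congr_mem l _ (fun acc blk => acc ++ pvYsp ymin ymax blk) []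
        (by intro acc blk _; unfold pvYsp; split <;> rename_i h <;> simp [h])]
  rw [PySem.List.foldl_append_eq_flatMap]
  rfl

lemma A_flat (blocks : List (List Int)) (limits : List Int) (xshift yshift : Int) :
    blockshift blocks limits xshift yshift =
      ((blocks.map (pvSh xshift yshift (PySem.List.pyGetD limits 1 0) (PySem.List.pyGetD limits 3 0))).flatMap
          (pvXsp (PySem.List.pyGetD limits 0 0) (PySem.List.pyGetD limits 1 0))).flatMap
        (pvYsp (PySem.List.pyGetD limits 2 0) (PySem.List.pyGetD limits 3 0)) := by
  simp only [blockshift]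
  rw [PySem.List.foldl_append_singleton_eq_map, pass2_eq, pass3_eq]
  simp only [List.nil_append]
  rfl

lemma B_flat (blocks : List (List Int)) (limits : List Int) (xshift yshift : Int) :
    blockshift_alt blocks limits xshift yshift =
      blocks.flatMap (pvG (PySem.List.pyGetD limits 0 0) (PySem.List.pyGetD limits 1 0)
        (PySem.List.pyGetD limits 2 0) (PySem.List.pyGetD limits 3 0) xshift yshift) := by
  simp only [blockshift_alt]
  rw [PySem.List.foldl_congr_mem blocks _ (fun acc blk => acc ++ pvG (PySem.List.pyGetD limits 0 0) (PySem.List.pyGetD limits 1 0)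
        (PySem.List.pyGetD limits 2 0) (PySem.List.pyGetD limits 3 0) xshift yshift blk) []
        (by intro acc blk _; rfl)]
  rw [PySem.List.foldl_append_eq_flatMap]
  simp

lemma perblock (xmin xmax ymin ymax xshift yshift : Int) (b : List Int) (hb : 4 ≤ b.length) :
    (pvXsp xmin xmax (pvSh xshift yshift xmax ymax b)).flatMap (pvYsp ymin ymax)
      = pvG xmin xmax ymin ymax xshift yshift b := by
  obtain ⟨b0, b1, b2, b3, rest, rfl⟩ : ∃ x0 x1 x2 x3 t, b = x0 :: x1 :: x2 :: x3 :: t := by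
    match b, hb with
    | x0 :: x1 :: x2 :: x3 :: t, _ => exact ⟨x0, x1, x2, x3, t, rfl⟩
  have htake : (rest.take 2).take 2 = rest.take 2 := by
    exact List.take_of_length_le (by simp)
  simp only [pvSh, pvXsp, pvYsp, pvG, PySem.List.slice_toNat,
    List.drop_succ_cons, List.drop_zero, List.take_succ_cons, List.take_zero, List.map_cons,
    List.map_nil, List.cons_append, List.nil_append, PySem.List.pyGetD_zero_cons,
    PySem.List.pyGetD_ofNat', htake]
  split_ifs <;> simp_all [pvYsp, PySem.List.slice_toNat, List.take_take, htake, PySem.List.pyGetD_ofNat'] <;>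
    (try split_ifs) <;> first | rfl | (exfalso; omega)

lemma flat_eq (xmin xmax ymin ymax xshift yshift : Int) (bl : List (List Int))
    (h : ∀ b ∈ bl, 4 ≤ b.length) :
    ((bl.map (pvSh xshift yshift xmax ymax)).flatMap (pvXsp xmin xmax)).flatMap (pvYsp ymin ymax)
      = bl.flatMap (pvG xmin xmax ymin ymax xshift yshift) := by
  induction bl with
  | nil => rfl
  | cons b bs ih =>
      simp only [List.map_cons, List.flatMap_cons, List.flatMap_append]
      rw [perblock xmin xmax ymin ymax xshift yshift b (h b (by simp)),
          ih (fun x hx => h x (by simp [hx]))]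

-- ===== VERDICT (by name: the statement is the Claim_ definition above) =====
theorem blockshift_spec : Claim_equal_blockshift := by
  intro blocks limits xshift yshift _hdom hpre
  obtain ⟨hlim, hlen, -⟩ := hpre
  unfold Spec_blockshift
  rw [A_flat, B_flat, flat_eq _ _ _ _ _ _ _ hlen]
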